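-- pv_equiv track=rewrite | github.com/iulifeif/AdventOfCode2024 | day4.py | find_word_diagonal_up_right
-- ===== SOURCE A (Python) =====
-- XMAS = ['X', 'M', 'A', 'S']
--
-- def find_word_diagonal_up_right(matrix, index_line, index_column, letter_pos):
--     if letter_pos == len(XMAS):
--         return True
--     if index_line == -1 or index_column == len(matrix[index_line]):
--         return False
--     if matrix[index_line][index_column] == XMAS[letter_pos]:
--         return find_word_diagonal_up_right(matrix, index_line - 1, index_column + 1, letter_pos + 1)
--     return False
-- ===== SOURCE B (Python) =====
-- XMAS = ['X', 'M', 'A', 'S']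
--
-- def find_word_diagonal_up_right(matrix, index_line, index_column, letter_pos):
--     while letter_pos != len(XMAS):
--         if index_line == -1 or index_column == len(matrix[index_line]):
--             return False
--         if matrix[index_line][index_column] != XMAS[letter_pos]:
--             return False
--         index_line -= 1
--         index_column += 1
--         letter_pos += 1
--     return True
-- ===== Notes on version B (the rewrite author's own statement) =====
-- stated objective: idiomatic
-- what changed: A's tail recursion is replaced by an explicit while loop over the three cursors (index_line, index_column, letter_pos) with the same guard order, so B reproduces A's value (and raises) everywhere.
import Mathlib
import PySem

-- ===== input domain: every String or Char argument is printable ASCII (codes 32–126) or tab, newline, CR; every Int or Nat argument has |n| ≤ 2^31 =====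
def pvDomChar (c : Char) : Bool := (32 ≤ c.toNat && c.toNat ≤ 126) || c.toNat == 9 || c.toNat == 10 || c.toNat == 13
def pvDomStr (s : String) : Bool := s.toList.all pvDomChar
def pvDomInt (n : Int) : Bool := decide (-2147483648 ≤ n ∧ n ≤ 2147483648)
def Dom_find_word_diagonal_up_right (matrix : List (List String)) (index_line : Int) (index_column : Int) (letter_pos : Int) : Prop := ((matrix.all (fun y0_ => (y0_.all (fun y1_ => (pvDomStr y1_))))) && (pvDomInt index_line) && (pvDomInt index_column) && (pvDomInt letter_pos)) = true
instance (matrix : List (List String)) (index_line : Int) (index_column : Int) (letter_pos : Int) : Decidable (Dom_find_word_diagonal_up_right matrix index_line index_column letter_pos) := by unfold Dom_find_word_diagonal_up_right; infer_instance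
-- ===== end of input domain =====

-- B turns A's tail recursion into an explicit while loop over the three cursors (same guard
-- order), so it returns A's value — and raises — on exactly the same inputs; no mutation.

-- ===== PORT A =====
def pyXMAS : List String := ["X", "M", "A", "S"]

-- used by A's (and B's) termination measure: a successful XMAS lookup forces letter_pos < 4
theorem xmas_lt {lp : Int} {x : String} (h : PySem.List.pyGet? pyXMAS lp = some x) : lp < 4 := by
  by_contra hc
  have : PySem.List.pyGet? pyXMAS lp = none := by
    rw [PySem.List.pyGet?_eq_none_iff]
    simp [PySem.Raise.InRange, pyXMAS]
    omega
  simp [this] at h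

def find_word_diagonal_up_right (matrix : List (List String)) (index_line : Int) (index_column : Int) (letter_pos : Int) : Bool :=
  if letter_pos = (pyXMAS.length : Int) then true
  else if index_line = -1 then false
  else match PySem.List.pyGet? matrix index_line with
    | none => false   -- IndexError on matrix[index_line]: excluded by Pre_
    | some row =>
      if index_column = (row.length : Int) then false
      else match PySem.List.pyGet? row index_column with
        | none => false   -- IndexError on matrix[index_line][index_column]: excluded by Pre_
        | some cell =>
          match h : PySem.List.pyGet? pyXMAS letter_pos with
          | none => false   -- IndexError on XMAS[letter_pos]: excluded by Pre_
          | some x =>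
            if cell = x then
              find_word_diagonal_up_right matrix (index_line - 1) (index_column + 1) (letter_pos + 1)
            else false
  termination_by (4 - letter_pos).toNat
  decreasing_by
    have := xmas_lt h
    omega

-- ===== PORT B =====
-- one pass through B's while-loop BODY: 'none' = the body returns False (or raises: excluded by
-- Pre_), 'some' = the three cursors after the updates at the bottom of the body
def bBody (matrix : List (List String)) (il ic lp : Int) : Option (Int × Int × Int) :=
  if il = -1 then none
  else match PySem.List.pyGet? matrix il with
    | none => none   -- IndexError on matrix[il]: excluded by Pre_
    | some row =>
      if ic = (row.length : Int) then none
      else match PySem.List.pyGet? row ic, PySem.List.pyGet? pyXMAS lp with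
        | some cell, some x => if cell ≠ x then none else some (il - 1, ic + 1, lp + 1)
        | _, _ => none   -- IndexError: excluded by Pre_

-- used by B's termination measure
theorem bBody_some {matrix : List (List String)} {il ic lp : Int} {s : Int × Int × Int}
    (h : bBody matrix il ic lp = some s) : lp < 4 ∧ s.2.2 = lp + 1 := by
  unfold bBody at h
  split_ifs at h
  split at h
  · exact absurd h (by simp)
  · split_ifs at h
    split at h
    · next cell x hx =>
      split_ifs at h
      refine ⟨xmas_lt hx, ?_⟩
      cases h
      rfl
    · exact absurd h (by simp)

-- B's while loop: test the condition, run the body, loop on the updated cursors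
def bRun (matrix : List (List String)) (il ic lp : Int) : Bool :=
  if lp = (pyXMAS.length : Int) then true
  else match h : bBody matrix il ic lp with
    | none => false
    | some (il', ic', lp') => bRun matrix il' ic' lp'
  termination_by (4 - lp).toNat
  decreasing_by
    obtain ⟨h1, h2⟩ := bBody_some h
    simp only at h2
    omega

def find_word_diagonal_up_right_alt (matrix : List (List String)) (index_line : Int) (index_column : Int) (letter_pos : Int) : Bool :=
  bRun matrix index_line index_column letter_pos

-- ===== PRECONDITION & SPEC =====
-- the walk CONTINUES past the state (il, ic, lp): the loop/recursion does another step there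
def pvContinues (matrix : List (List String)) (il ic lp : Int) : Bool :=
  lp ≠ 4 && il ≠ -1 &&
  match PySem.List.pyGet? matrix il with
  | none => false
  | some row =>
    ic ≠ (row.length : Int) &&
    match PySem.List.pyGet? row ic, PySem.List.pyGet? pyXMAS lp with
    | some cell, some x => cell = x
    | _, _ => false

-- the step at state (il, ic, lp) raises no IndexError: it stops with True (lp = 4) or False
-- (il = -1, or ic = row length), or every index it evaluates is in range
def pvSafe (matrix : List (List String)) (il ic lp : Int) : Bool :=
  lp = 4 || il = -1 ||
  match PySem.List.pyGet? matrix il with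
  | none => false
  | some row =>
    ic = (row.length : Int) ||
    ((PySem.List.pyGet? row ic).isSome && (PySem.List.pyGet? pyXMAS lp).isSome)

-- Pre_ excludes exactly the inputs where A raises IndexError: every step of the up-right walk
-- that is actually reached (all earlier cells matched their XMAS letter) must index in range;
-- at most 9 steps are reachable, since a match forces -4 ≤ letter_pos < 4 and letter_pos grows.
def Pre_find_word_diagonal_up_right (matrix : List (List String)) (index_line : Int) (index_column : Int) (letter_pos : Int) : Prop :=
  ∀ k ∈ List.range 9,
    (∀ j ∈ List.range k, pvContinues matrix (index_line - j) (index_column + j) (letter_pos + j) = true) →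
    pvSafe matrix (index_line - k) (index_column + k) (letter_pos + k) = true
instance (matrix : List (List String)) (index_line : Int) (index_column : Int) (letter_pos : Int) : Decidable (Pre_find_word_diagonal_up_right matrix index_line index_column letter_pos) := by unfold Pre_find_word_diagonal_up_right; infer_instance

def pvWitness_find_word_diagonal_up_right : List (List String) × Int × Int × Int := ([["M"], ["X"]], 1, 0, 0)

def Spec_find_word_diagonal_up_right (matrix : List (List String)) (index_line : Int) (index_column : Int) (letter_pos : Int) (out : Bool) : Prop := out = find_word_diagonal_up_right_alt matrix index_line index_column letter_pos
instance (matrix : List (List String)) (index_line : Int) (index_column : Int) (letter_pos : Int) (out : Bool) : Decidable (Spec_find_word_diagonal_up_right matrix index_line index_column letter_pos out) := by unfold Spec_find_word_diagonal_up_right; infer_instance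

-- ===== CLAIM =====
def Claim_equal_find_word_diagonal_up_right : Prop := ∀ (matrix : List (List String)) (index_line : Int) (index_column : Int) (letter_pos : Int), Dom_find_word_diagonal_up_right matrix index_line index_column letter_pos → Pre_find_word_diagonal_up_right matrix index_line index_column letter_pos → Spec_find_word_diagonal_up_right matrix index_line index_column letter_pos (find_word_diagonal_up_right matrix index_line index_column letter_pos)

-- ===== LEMMAS AND PROOFS =====
-- rewrite rules for B's loop (its match carries an equation binder, so we unfold it here once)
theorem bRun_true {matrix : List (List String)} {il ic lp : Int}
    (h4 : lp = (pyXMAS.length : Int)) : bRun matrix il ic lp = true := by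
  rw [bRun.eq_def, if_pos h4]

theorem bRun_false {matrix : List (List String)} {il ic lp : Int}
    (h4 : ¬ lp = (pyXMAS.length : Int)) (hb : bBody matrix il ic lp = none) :
    bRun matrix il ic lp = false := by
  rw [bRun.eq_def, if_neg h4]
  split
  · rfl
  · next heq => rw [hb] at heq; exact absurd heq (by simp)

theorem bRun_step {matrix : List (List String)} {il ic lp a b c : Int}
    (h4 : ¬ lp = (pyXMAS.length : Int)) (hb : bBody matrix il ic lp = some (a, b, c)) :
    bRun matrix il ic lp = bRun matrix a b c := by
  rw [bRun.eq_def, if_neg h4]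
  split
  · next heq => rw [hb] at heq; exact absurd heq (by simp)
  · next a' b' c' heq =>
    rw [hb] at heq
    cases heq
    rfl

-- the two ports agree on EVERY input (the raise branches return false in both)
theorem ports_agree : ∀ (n : Nat) (matrix : List (List String)) (il ic lp : Int),
    (4 - lp).toNat ≤ n →
    find_word_diagonal_up_right matrix il ic lp = bRun matrix il ic lp := by
  intro n
  induction n with
  | zero =>
    intro m il ic lp hn
    rw [find_word_diagonal_up_right]
    by_cases h4 : lp = (pyXMAS.length : Int)
    · rw [if_pos h4, bRun_true h4]
    · rw [if_neg h4]
      have hgt : 4 < lp := by simp [pyXMAS] at h4; omega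
      by_cases hil : il = -1
      · rw [if_pos hil, bRun_false h4 (by simp [bBody, hil])]
      · rw [if_neg hil]
        cases hrow : PySem.List.pyGet? m il with
        | none => rw [bRun_false h4 (by simp [bBody, hil, hrow])]
        | some row =>
          dsimp only
          by_cases hic : ic = (row.length : Int)
          · rw [if_pos hic, bRun_false h4 (by simp [bBody, hil, hrow, hic])]
          · rw [if_neg hic]
            cases hcell : PySem.List.pyGet? row ic with
            | none => rw [bRun_false h4 (by simp [bBody, hil, hrow, hic, hcell])]
            | some cell =>
              dsimp only
              cases hx : PySem.List.pyGet? pyXMAS lp with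
              | none => rw [bRun_false h4 (by simp [bBody, hil, hrow, hic, hcell, hx])]
              | some x => exact absurd (xmas_lt hx) (by omega)
  | succ n ih =>
    intro m il ic lp hn
    rw [find_word_diagonal_up_right]
    by_cases h4 : lp = (pyXMAS.length : Int)
    · rw [if_pos h4, bRun_true h4]
    · rw [if_neg h4]
      by_cases hil : il = -1
      · rw [if_pos hil, bRun_false h4 (by simp [bBody, hil])]
      · rw [if_neg hil]
        cases hrow : PySem.List.pyGet? m il with
        | none => rw [bRun_false h4 (by simp [bBody, hil, hrow])]
        | some row =>
          dsimp only
          by_cases hic : ic = (row.length : Int)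
          · rw [if_pos hic, bRun_false h4 (by simp [bBody, hil, hrow, hic])]
          · rw [if_neg hic]
            cases hcell : PySem.List.pyGet? row ic with
            | none => rw [bRun_false h4 (by simp [bBody, hil, hrow, hic, hcell])]
            | some cell =>
              dsimp only
              cases hx : PySem.List.pyGet? pyXMAS lp with
              | none => rw [bRun_false h4 (by simp [bBody, hil, hrow, hic, hcell, hx])]
              | some x =>
                dsimp only
                by_cases hcx : cell = x
                · have hlt := xmas_lt hx
                  rw [if_pos hcx,
                      bRun_step (a := il - 1) (b := ic + 1) (c := lp + 1) h4
                        (by simp [bBody, hil, hrow, hic, hcell, hx, hcx])]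
                  exact ih m (il - 1) (ic + 1) (lp + 1) (by omega)
                · rw [if_neg hcx, bRun_false h4 (by simp [bBody, hil, hrow, hic, hcell, hx, hcx])]

-- ===== VERDICT =====
theorem find_word_diagonal_up_right_spec : Claim_equal_find_word_diagonal_up_right := by
  intro m il ic lp _ _
  unfold Spec_find_word_diagonal_up_right find_word_diagonal_up_right_alt
  exact ports_agree (4 - lp).toNat m il ic lp le_rfl
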